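-- pv_equiv track=rewrite | github.com/machadosguilherme/Tech-challenge | app/crud/producao.py | extrair_categoria
-- ===== SOURCE A (Python) =====
-- def extrair_categoria(control):
--     # Categorias principais (linhas que não começam com prefixo)
--     if not any(control.startswith(prefix) for prefix in ['vm_', 'vv_', 'su_', 'de_']):
--         return control
--     # Subcategorias de VINHO DE MESA
--     elif control.startswith('vm_'):
--         return 'VINHO DE MESA'
--     # Subcategorias de VINHO FINO (VINIFERA)
--     elif control.startswith('vv_'):
--         return 'VINHO FINO DE MESA (VINIFERA)'
--     # Subcategorias de SUCO
--     elif control.startswith('su_'):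
--         return 'SUCO'
--     # Subcategorias de DERIVADOS
--     elif control.startswith('de_'):
--         return 'DERIVADOS'
--     else:
--         return '-'
-- ===== SOURCE B (Python) =====
-- def extrair_categoria(control):
--     # Hand-unrolled character trie: branch on the first two characters,
--     # guarded by the underscore at position 2; no prefix strings, no scan.
--     if len(control) >= 3 and control[2] == '_':
--         c0, c1 = control[0], control[1]
--         if c0 == 'v':
--             if c1 == 'm':
--                 return 'VINHO DE MESA'
--             if c1 == 'v':
--                 return 'VINHO FINO DE MESA (VINIFERA)'
--         elif c0 == 's':
--             if c1 == 'u':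
--                 return 'SUCO'
--         elif c0 == 'd':
--             if c1 == 'e':
--                 return 'DERIVADOS'
--     return control
-- ===== Notes on version B (the rewrite author's own statement) =====
-- stated objective: alternative
-- what changed: Replaces the any()-scan over four prefix strings plus the startswith branch ladder (and the dead '-' branch) by a hand-unrolled character trie: one underscore guard at position 2 and nested single-character comparisons on control[0] and control[1].
import Mathlib
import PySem

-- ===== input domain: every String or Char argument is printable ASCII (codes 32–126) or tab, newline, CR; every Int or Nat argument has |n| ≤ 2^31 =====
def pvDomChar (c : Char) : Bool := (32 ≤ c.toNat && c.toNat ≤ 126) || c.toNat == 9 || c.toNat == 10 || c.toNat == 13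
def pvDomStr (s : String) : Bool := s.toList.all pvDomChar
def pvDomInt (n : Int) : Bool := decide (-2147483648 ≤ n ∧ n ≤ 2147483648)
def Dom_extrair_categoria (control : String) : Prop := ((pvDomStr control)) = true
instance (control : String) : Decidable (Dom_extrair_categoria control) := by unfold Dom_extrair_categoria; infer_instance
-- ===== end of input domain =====

-- B replaces A's any()-scan over prefix strings and startswith ladder by a hand-unrolled
-- character trie (underscore guard at position 2, nested single-character tests) — alternative.

-- ===== PORT A =====
def extrair_categoria (control : String) : String :=
  if ¬ (["vm_", "vv_", "su_", "de_"].any (fun pfx => PySem.Str.startswith control pfx)) then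
    control
  else if PySem.Str.startswith control "vm_" then
    "VINHO DE MESA"
  else if PySem.Str.startswith control "vv_" then
    "VINHO FINO DE MESA (VINIFERA)"
  else if PySem.Str.startswith control "su_" then
    "SUCO"
  else if PySem.Str.startswith control "de_" then
    "DERIVADOS"
  else
    "-"

-- ===== PORT B =====
-- Transliteration of Source B: len ≥ 3 together with indexing control[0..2] is the
-- match on the first three characters of the string; branches follow Source B's order.
def extrair_categoria_alt (control : String) : String :=
  match control.toList with
  | c0 :: c1 :: c2 :: _ =>
    if c2 = '_' then
      if c0 = 'v' then
        if c1 = 'm' then "VINHO DE MESA"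
        else if c1 = 'v' then "VINHO FINO DE MESA (VINIFERA)"
        else control
      else if c0 = 's' then
        if c1 = 'u' then "SUCO" else control
      else if c0 = 'd' then
        if c1 = 'e' then "DERIVADOS" else control
      else control
    else control
  | _ => control

-- ===== PRECONDITION & SPEC =====
def Spec_extrair_categoria (control : String) (out : String) : Prop := out = extrair_categoria_alt control
instance (control : String) (out : String) : Decidable (Spec_extrair_categoria control out) := by unfold Spec_extrair_categoria; infer_instance

-- ===== CLAIM (what is proved, stated in full; the proofs are below) =====
def Claim_equal_extrair_categoria : Prop := ∀ (control : String), Dom_extrair_categoria control → Spec_extrair_categoria control (extrair_categoria control)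

-- ===== LEMMAS AND PROOFS =====

lemma sw_cons3 (c0 c1 c2 : Char) (rest : List Char) (p0 p1 p2 : Char) :
    PySem.Chars.startswith (c0 :: c1 :: c2 :: rest) [p0, p1, p2]
      = ((p0 == c0) && ((p1 == c1) && (p2 == c2))) := by
  simp [PySem.Chars.startswith, List.isPrefixOf]

lemma sw_short (l : List Char) (h : l.length < 3) (p0 p1 p2 : Char) :
    PySem.Chars.startswith l [p0, p1, p2] = false := by
  rcases l with _ | ⟨a, _ | ⟨b, _ | ⟨c, r⟩⟩⟩
  · simp [PySem.Chars.startswith, List.isPrefixOf]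
  · simp [PySem.Chars.startswith, List.isPrefixOf]
  · simp [PySem.Chars.startswith, List.isPrefixOf]
  · exact absurd h (by simp)

-- ===== VERDICT (by name: the statement is the Claim_ definition above) =====
theorem extrair_categoria_spec : Claim_equal_extrair_categoria := by
  intro control _
  unfold Spec_extrair_categoria
  rcases hl : control.toList with _ | ⟨c0, _ | ⟨c1, _ | ⟨c2, rest⟩⟩⟩ <;>
    simp only [extrair_categoria, extrair_categoria_alt, PySem.Str.startswith_eq, hl]
  · have h := sw_short [] (by simp)
    simp [h]
  · have h := sw_short [c0] (by simp)
    simp [h]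
  · have h := sw_short [c0, c1] (by simp)
    simp [h]
  · simp only [show ("vm_" : String).toList = ['v','m','_'] from rfl,
      show ("vv_" : String).toList = ['v','v','_'] from rfl,
      show ("su_" : String).toList = ['s','u','_'] from rfl,
      show ("de_" : String).toList = ['d','e','_'] from rfl,
      sw_cons3, List.any_cons, List.any_nil]
    by_cases h2 : c2 = '_'
    · subst h2
      by_cases h0v : c0 = 'v' <;> by_cases h0s : c0 = 's' <;> by_cases h0d : c0 = 'd' <;>
        by_cases h1m : c1 = 'm' <;> by_cases h1v : c1 = 'v' <;> by_cases h1u : c1 = 'u' <;>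
        by_cases h1e : c1 = 'e' <;> (try simp_all) <;> simp_all [eq_comm]
    · have hc2 : ('_' == c2) = false := beq_eq_false_iff_ne.mpr (fun hh => h2 hh.symm)
      simp [hc2, h2]
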